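-- pv_equiv track=rewrite | github.com/zuoyifan132/ToolAce | toolace/dlv/rule_checker.py | _check_dialog_flow
-- ===== SOURCE A (Python) =====
-- from typing import Dict, List, Optional, Any, Set
--
-- def _check_dialog_flow(turns: List[Dict]) -> List[str]:
--     """Check dialog flow logic"""
--     errors = []
--
--     if not turns:
--         return errors
--
--     # Check if dialog starts with user
--     if turns[0].get("role") != "user":
--         errors.append("对话应该以用户发言开始")
--
--     # Check alternating pattern (not strictly required but good practice)
--     prev_role = None
--     consecutive_count = 0
--
--     for i, turn in enumerate(turns):
--         role = turn.get("role")
--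
--         if role == prev_role:
--             consecutive_count += 1
--             if consecutive_count >= 3:
--                 errors.append(f"轮次 {i+1}: 连续{consecutive_count}次相同角色发言")
--         else:
--             consecutive_count = 1
--
--         prev_role = role
--
--     return errors
-- ===== SOURCE B (Python) =====
-- def _check_dialog_flow(turns):
--     """Check dialog flow logic (run-grouping re-implementation)."""
--     if not turns:
--         return []
--     head = [] if turns[0].get("role") == "user" else ["对话应该以用户发言开始"]
--     return head + _runs(0, turns)
--
--
-- def _runs(i, ts):
--     """Errors for consecutive-role runs; ts is the remaining suffix, i its start index."""
--     if not ts: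
--         return []
--     role = ts[0].get("role")
--     k = 1
--     while k < len(ts) and ts[k].get("role") == role:
--         k += 1
--     errs = [f"轮次 {i + p + 1}: 连续{p + 1}次相同角色发言" for p in range(2, k)]
--     return errs + _runs(i + k, ts[k:])
-- ===== Notes on version B (the rewrite author's own statement) =====
-- stated objective: alternative
-- what changed: Replaces the prev_role/consecutive_count state machine threaded through a single enumerate loop by an explicit decomposition into maximal runs of equal roles (two-pointer run detection plus a per-run comprehension emitting positions >= 3).
import Mathlib
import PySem

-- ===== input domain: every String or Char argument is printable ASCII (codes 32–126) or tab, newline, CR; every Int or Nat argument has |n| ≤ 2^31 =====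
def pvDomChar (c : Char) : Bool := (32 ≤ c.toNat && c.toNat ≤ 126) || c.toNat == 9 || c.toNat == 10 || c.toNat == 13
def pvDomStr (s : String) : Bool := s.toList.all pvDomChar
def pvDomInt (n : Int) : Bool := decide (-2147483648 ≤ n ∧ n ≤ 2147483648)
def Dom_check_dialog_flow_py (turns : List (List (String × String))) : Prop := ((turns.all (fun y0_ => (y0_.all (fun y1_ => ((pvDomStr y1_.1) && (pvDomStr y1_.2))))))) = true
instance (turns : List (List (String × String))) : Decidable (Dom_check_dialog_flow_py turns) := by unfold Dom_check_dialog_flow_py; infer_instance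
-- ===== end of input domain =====

-- B replaces A's prev_role/consecutive_count state machine by an explicit decomposition
-- into maximal runs of equal roles (alternative decomposition, same cost).

-- shared helpers: dict.get("role") (first match) and the error message f-string
def pvGetRole (t : List (String × String)) : Option String :=
  (t.find? (fun p => p.1 == "role")).map (·.2)

def pvMsg (t c : Int) : String :=
  "轮次 " ++ PySem.Int.toStr t ++ ": 连续" ++ PySem.Int.toStr c ++ "次相同角色发言"

-- ===== PORT A =====
-- body of A's for loop: state = (errors, prev_role, consecutive_count)
def pvStepA (s : List String × Option String × Int) (p : Int × List (String × String)) :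
    List String × Option String × Int :=
  let role := pvGetRole p.2
  if role == s.2.1 then
    let c := s.2.2 + 1
    ((if c ≥ 3 then s.1 ++ [pvMsg (p.1 + 1) c] else s.1), role, c)
  else (s.1, role, 1)

def check_dialog_flow_py (turns : List (List (String × String))) : List String :=
  match turns with
  | [] => []
  | t0 :: _ =>
    let errors0 : List String :=
      if pvGetRole t0 ≠ some "user" then ["对话应该以用户发言开始"] else []
    let st := (PySem.List.enumerate turns 0).foldl pvStepA (errors0, none, 0)
    st.1

-- ===== PORT B =====
-- the while loop of _runs scans the maximal run of equal roles: run = takeWhile, ts[k:] = dropWhile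
def pvRuns (i : Int) (ts : List (List (String × String))) : List String :=
  match ts with
  | [] => []
  | t :: rest =>
    let role := pvGetRole t
    let k : Int := 1 + (rest.takeWhile (fun u => pvGetRole u == role)).length
    ((PySem.List.pyRange 2 k 1).map (fun p => pvMsg (i + p + 1) (p + 1)))
      ++ pvRuns (i + k) (rest.dropWhile (fun u => pvGetRole u == role))
termination_by ts.length
decreasing_by
  simp only [List.length_cons]
  exact Nat.lt_succ_of_le (List.length_dropWhile_le _ _)

def check_dialog_flow_py_alt (turns : List (List (String × String))) : List String :=
  match turns with
  | [] => []
  | t0 :: _ =>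
    (if pvGetRole t0 == some "user" then [] else ["对话应该以用户发言开始"])
      ++ pvRuns 0 turns

-- ===== PRECONDITION & SPEC =====
def Spec_check_dialog_flow_py (turns : List (List (String × String))) (out : List String) : Prop := out = check_dialog_flow_py_alt turns
instance (turns : List (List (String × String))) (out : List String) : Decidable (Spec_check_dialog_flow_py turns out) := by unfold Spec_check_dialog_flow_py; infer_instance

-- ===== CLAIM (what is proved, stated in full; the proofs are below) =====
def Claim_equal_check_dialog_flow_py : Prop := ∀ (turns : List (List (String × String))), Dom_check_dialog_flow_py turns → Spec_check_dialog_flow_py turns (check_dialog_flow_py turns)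

-- ===== LEMMAS AND PROOFS =====

-- proof-side view of A's loop, with the accumulator factored out
def pvG (i : Int) (prev : Option String) (cnt : Int) : List (List (String × String)) → List String
  | [] => []
  | t :: ts =>
    let role := pvGetRole t
    if role == prev then
      (if cnt + 1 ≥ 3 then [pvMsg (i + 1) (cnt + 1)] else []) ++ pvG (i + 1) role (cnt + 1) ts
    else pvG (i + 1) role 1 ts

-- the errors a run of length m emits when entered at index i with counter cnt
def pvEmit (i cnt : Int) : Nat → List String
  | 0 => []
  | m + 1 => (if cnt + 1 ≥ 3 then [pvMsg (i + 1) (cnt + 1)] else []) ++ pvEmit (i + 1) (cnt + 1) m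

theorem pvFold_eq_pvG (ts : List (List (String × String))) (i : Int)
    (errs : List String) (prev : Option String) (cnt : Int) :
    ((PySem.List.enumerate ts i).foldl pvStepA (errs, prev, cnt)).1
      = errs ++ pvG i prev cnt ts := by
  induction ts generalizing i errs prev cnt with
  | nil => simp [PySem.List.enumerate_nil, pvG]
  | cons t ts ih =>
    rw [PySem.List.enumerate_cons, List.foldl_cons]
    by_cases h : pvGetRole t == prev
    · by_cases h3 : cnt + 1 ≥ 3
      · rw [show pvStepA (errs, prev, cnt) (i, t)
              = (errs ++ [pvMsg (i + 1) (cnt + 1)], pvGetRole t, cnt + 1) from by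
            simp [pvStepA, h, h3], ih]
        simp [pvG, h, h3]
      · rw [show pvStepA (errs, prev, cnt) (i, t) = (errs, pvGetRole t, cnt + 1) from by
            simp [pvStepA, h, h3], ih]
        simp [pvG, h, h3]
    · rw [show pvStepA (errs, prev, cnt) (i, t) = (errs, pvGetRole t, 1) from by
            simp [pvStepA, h], ih]
      simp [pvG, h]

theorem pvEmit_zero (i cnt : Int) : pvEmit i cnt 0 = [] := by simp [pvEmit]

theorem pvEmit_succ (i cnt : Int) (m : Nat) :
    pvEmit i cnt (m + 1) =
      (if cnt + 1 ≥ 3 then [pvMsg (i + 1) (cnt + 1)] else []) ++ pvEmit (i + 1) (cnt + 1) m := rfl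

theorem pvEmit_snoc (i cnt : Int) (m : Nat) :
    pvEmit i cnt (m + 1) =
      pvEmit i cnt m ++ (if cnt + m + 1 ≥ 3 then [pvMsg (i + m + 1) (cnt + m + 1)] else []) := by
  induction m generalizing i cnt with
  | zero => rw [pvEmit_succ]; simp [pvEmit]
  | succ m ih =>
    rw [pvEmit_succ, ih, pvEmit_succ, List.append_assoc]
    congr 2
    have h1 : cnt + 1 + (m : Int) + 1 = cnt + ((m : Nat) + 1 : Nat) + 1 := by push_cast; ring
    have h2 : i + 1 + (m : Int) + 1 = i + ((m : Nat) + 1 : Nat) + 1 := by push_cast; ring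
    rw [h1, h2]

theorem pvEmit_eq_pyRange_map (i : Int) (m : Nat) :
    pvEmit (i + 1) 1 m =
      (PySem.List.pyRange 2 (1 + (m : Int)) 1).map (fun p => pvMsg (i + p + 1) (p + 1)) := by
  induction m with
  | zero =>
    rw [pvEmit_zero, PySem.List.pyRange_one_eq_nil (by norm_num)]
    simp
  | succ m ih =>
    rw [pvEmit_snoc, ih]
    rcases Nat.eq_zero_or_pos m with hm | hm
    · subst hm
      rw [PySem.List.pyRange_one_eq_nil (by norm_num), PySem.List.pyRange_one_eq_nil (by norm_num)]
      norm_num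
    · have h2 : (2:Int) ≤ 1 + (m:Int) := by omega
      rw [show (1 + ((m:Nat) + 1 : Nat) : Int) = (1 + (m:Int)) + 1 by push_cast; ring,
        PySem.List.pyRange_one_succ_right h2]
      rw [if_pos (by omega)]
      simp only [List.map_append, List.map_cons, List.map_nil]
      rw [show i + 1 + (m : Int) + 1 = i + (1 + (m : Int)) + 1 from by ring]

theorem pvG_eq_emit_runs (ts : List (List (String × String))) (role : Option String)
    (cnt i : Int) :
    pvG i role cnt ts =
      pvEmit i cnt (ts.takeWhile (fun u => pvGetRole u == role)).length
        ++ pvRuns (i + (ts.takeWhile (fun u => pvGetRole u == role)).length)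
             (ts.dropWhile (fun u => pvGetRole u == role)) := by
  induction ts generalizing role cnt i with
  | nil => simp [pvG, pvEmit_zero, pvRuns]
  | cons t ts ih =>
    by_cases h : pvGetRole t == role
    · have he : pvGetRole t = role := by simpa using h
      subst he
      simp only [pvG, List.takeWhile_cons, List.dropWhile_cons, beq_self_eq_true, if_true,
        List.length_cons]
      rw [pvEmit_succ, ih, List.append_assoc]
      push_cast
      ring_nf
    · simp only [pvG, List.takeWhile_cons, List.dropWhile_cons, h, if_false,
        Bool.false_eq_true, List.length_nil, pvEmit_zero, List.nil_append,
        Nat.cast_zero, add_zero]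
      rw [ih, pvRuns]
      congr 1
      · rw [pvEmit_eq_pyRange_map]
      · congr 1
        ring

-- the first iteration of A's loop only initializes the state (counter 1, no emission)
theorem pvG_first (t0 : List (String × String)) (ts : List (List (String × String))) :
    pvG 0 none 0 (t0 :: ts) = pvG 1 (pvGetRole t0) 1 ts := by
  simp only [pvG]
  by_cases h : pvGetRole t0 == none
  · simp [h]
  · simp [h]

-- ===== VERDICT (by name: the statement is the Claim_ definition above) =====
theorem check_dialog_flow_py_spec : Claim_equal_check_dialog_flow_py := by
  intro turns _
  unfold Spec_check_dialog_flow_py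
  cases turns with
  | nil => rfl
  | cons t0 ts =>
    show check_dialog_flow_py (t0 :: ts) = check_dialog_flow_py_alt (t0 :: ts)
    unfold check_dialog_flow_py check_dialog_flow_py_alt
    simp only []
    rw [pvFold_eq_pvG]
    congr 1
    · by_cases h : pvGetRole t0 = some "user"
      · simp [h]
      · simp [h]
    · rw [pvG_first, pvG_eq_emit_runs, pvRuns]
      congr 1
      · simpa using pvEmit_eq_pyRange_map 0
          (ts.takeWhile (fun u => pvGetRole u == pvGetRole t0)).length
      · congr 1
        ring
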